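-- pv_equiv track=rewrite | github.com/SimleCat/assignment | python/20150304/4f/4f.py | get_print_items
-- ===== SOURCE A (Python) =====
-- def get_print_items(items_len, items):
-- 	format_str = ""
-- 	for i in range(len(items)):
-- 		format_str += "%"
-- 		if i != 2:
-- 			format_str += "-"
-- 		format_str += str(items_len[i]) + "s  "
-- 	return format_str % tuple(items)
-- ===== SOURCE B (Python) =====
-- def get_print_items(items_len, items):
--     out = ""
--     for i in range(len(items)):
--         spec = "%" + ("" if i == 2 else "-") + str(items_len[i]) + "s"
--         out += spec % (items[i],) + "  "
--     return out
-- ===== Notes on version B (the rewrite author's own statement) =====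
-- stated objective: alternative
-- what changed: B formats each column independently with its own one-field spec applied to that single item and concatenates the pieces, instead of A's accumulation of one combined template string applied in a single bulk '%' over tuple(items).
import Mathlib
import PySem

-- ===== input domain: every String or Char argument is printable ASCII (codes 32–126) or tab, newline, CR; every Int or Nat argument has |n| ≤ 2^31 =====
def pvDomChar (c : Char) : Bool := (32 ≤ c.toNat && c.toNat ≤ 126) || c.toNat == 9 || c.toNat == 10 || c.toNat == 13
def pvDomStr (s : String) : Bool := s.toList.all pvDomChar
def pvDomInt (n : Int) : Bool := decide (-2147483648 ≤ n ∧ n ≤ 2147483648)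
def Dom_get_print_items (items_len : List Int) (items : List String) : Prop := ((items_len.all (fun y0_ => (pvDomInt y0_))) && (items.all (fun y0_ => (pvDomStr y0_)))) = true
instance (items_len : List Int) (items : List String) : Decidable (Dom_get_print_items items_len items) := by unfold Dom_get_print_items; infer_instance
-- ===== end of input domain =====

-- B formats each column on its own and joins the pieces, instead of A's single combined
-- template applied in one bulk '%'; same return value, a different decomposition (objective: alternative).

-- ===== PORT A =====

-- Python's space padding of a string argument to a field width: '%-Ns' (left) / '%Ns' (right)
def pvPad (left : Bool) (w : Nat) (s : List Char) : List Char :=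
  if left then s ++ List.replicate (w - s.length) ' '
  else List.replicate (w - s.length) ' ' ++ s

-- Hand port of Python's '%' string interpolation, exact on the format strings A builds:
-- literal characters and specs of the form '%' '-'* digits* 's', each consuming one string
-- argument; a spec is left-justified iff at least one '-' flag is present (as in CPython,
-- where repeated flags are allowed, so a negative width contributes its '-' as a flag).
-- A malformed spec or a missing argument is where Python raises: that branch returns [].
def pvApplyFmt : List Char → List String → List Char
  | [], _ => []
  | '%' :: rest, args =>
      let flags := rest.takeWhile (fun c => c == '-')
      let r1 := rest.dropWhile (fun c => c == '-')
      let ds := r1.takeWhile (fun c => c.isDigit)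
      let w := ds.foldl (fun a c => a * 10 + (c.toNat - 48)) 0
      let r2 := r1.dropWhile (fun c => c.isDigit)
      if r2.head? = some 's' then
        match args with
        | a :: as => pvPad (!flags.isEmpty) w a.toList ++ pvApplyFmt r2.tail as
        | [] => []
      else []
  | c :: rest, args => c :: pvApplyFmt rest args
termination_by cs _ => cs.length
decreasing_by
  · have h1 := List.length_dropWhile_le (fun c => c == '-') rest
    have h2 := List.length_dropWhile_le (fun c => c.isDigit) (rest.dropWhile (fun c => c == '-'))
    have h3 : (((rest.dropWhile (fun c => c == '-')).dropWhile (fun c => c.isDigit)).tail).length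
        ≤ ((rest.dropWhile (fun c => c == '-')).dropWhile (fun c => c.isDigit)).length := by
      rw [List.length_tail]; omega
    simp
    omega
  · simp

-- literal port of A: build the combined format string in a loop, then apply it to tuple(items)
def get_print_items (items_len : List Int) (items : List String) : String :=
  let format_str : List Char :=
    (PySem.List.pyRange 0 (PySem.List.len items) 1).foldl
      (fun acc i =>
        let acc := acc ++ ['%']
        let acc := if i ≠ 2 then acc ++ ['-'] else acc
        acc ++ (PySem.Int.toChars ((PySem.List.pyGet? items_len i).getD 0) ++ ('s' :: ' ' :: ' ' :: [])))
      []
  String.ofList (pvApplyFmt format_str items)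

-- ===== PORT B =====

-- literal port of B: per column, spec = '%' ('-' unless i==2) str(items_len[i]) 's' applied to
-- items[i] alone, plus two spaces; 'spec % (items[i],)' is ported as direct padding — left-
-- justified iff a '-' flag is present (i ≠ 2) or str(items_len[i]) starts with '-' (negative
-- width), to field width |items_len[i]| — exact for the spec strings B builds.
def get_print_items_alt (items_len : List Int) (items : List String) : String :=
  String.ofList
    ((List.range items.length).foldl
      (fun acc (i : Nat) =>
        let w := (PySem.List.pyGet? items_len (i : Int)).getD 0
        let s := (PySem.List.pyGet? items (i : Int)).getD ""
        acc ++ (pvPad (decide (i ≠ 2) || decide (w < 0)) w.natAbs s.toList ++ [' ', ' ']))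
      [])

-- ===== PRECONDITION & SPEC =====

-- Pre_ excludes exactly the inputs on which A raises: an items_len shorter than items (IndexError).
def Pre_get_print_items (items_len : List Int) (items : List String) : Prop :=
  items.length ≤ items_len.length
instance (items_len : List Int) (items : List String) : Decidable (Pre_get_print_items items_len items) := by unfold Pre_get_print_items; infer_instance

def pvWitness_get_print_items : List Int × List String := ([5, 3, 4], ["ab", "c", "def"])

def Spec_get_print_items (items_len : List Int) (items : List String) (out : String) : Prop := out = get_print_items_alt items_len items
instance (items_len : List Int) (items : List String) (out : String) : Decidable (Spec_get_print_items items_len items out) := by unfold Spec_get_print_items; infer_instance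

-- ===== CLAIM (what is proved, stated in full; the proofs are below) =====
def Claim_equal_get_print_items : Prop := ∀ (items_len : List Int) (items : List String), Dom_get_print_items items_len items → Pre_get_print_items items_len items → Spec_get_print_items items_len items (get_print_items items_len items)

-- ===== LEMMAS AND PROOFS =====

-- reference decimal digit list of a Nat (mirrors Nat.toDigitsCore's stop condition n / 10 = 0)
def pvRep (n : Nat) : List Char :=
  if h : n / 10 = 0 then [Nat.digitChar (n % 10)]
  else pvRep (n / 10) ++ [Nat.digitChar (n % 10)]
decreasing_by exact Nat.div_lt_self (by omega) (by omega)

lemma pvToDigitsCore_eq : ∀ (f n : Nat) (acc : List Char), 0 < f → n < 10 ^ f →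
    Nat.toDigitsCore 10 f n acc = pvRep n ++ acc := by
  intro f
  induction f with
  | zero => intro n acc h0 _; exact absurd h0 (by omega)
  | succ f ih =>
    intro n acc _ hn
    rw [Nat.toDigitsCore, pvRep]
    by_cases h : n / 10 = 0
    · simp [h]
    · have hp : 10 ^ (f + 1) = 10 ^ f * 10 := pow_succ 10 f
      have hq : n / 10 < 10 ^ f := by
        rw [Nat.div_lt_iff_lt_mul (by omega)]; omega
      have hf : 0 < f := by
        by_contra hc
        have : f = 0 := by omega
        subst this
        simp at hq
        omega
      simp only [h, dite_false]
      rw [ih (n / 10) _ hf hq]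
      simp

lemma pvToDigits_eq (n : Nat) : Nat.toDigits 10 n = pvRep n := by
  have h1 : n < 10 ^ n := Nat.lt_pow_self (by norm_num)
  have h2 : (10:Nat) ^ n ≤ 10 ^ (n + 1) := Nat.pow_le_pow_right (by norm_num) (by omega)
  rw [Nat.toDigits, pvToDigitsCore_eq (n + 1) n [] (by omega) (by omega)]
  simp

lemma pvDigitChar_isDigit (k : Nat) (h : k < 10) : (Nat.digitChar k).isDigit = true := by
  interval_cases k <;> decide

lemma pvDigitChar_val (k : Nat) (h : k < 10) : (Nat.digitChar k).toNat - 48 = k := by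
  interval_cases k <;> decide

lemma pvRep_isDigit (n : Nat) : ∀ c ∈ pvRep n, c.isDigit = true := by
  fun_induction pvRep n with
  | case1 n h => intro c hc; simp at hc; subst hc; exact pvDigitChar_isDigit _ (Nat.mod_lt _ (by omega))
  | case2 n h ih =>
    intro c hc
    rw [List.mem_append] at hc
    rcases hc with hc | hc
    · exact ih c hc
    · simp at hc; subst hc; exact pvDigitChar_isDigit _ (Nat.mod_lt _ (by omega))

lemma pvRep_cons (n : Nat) : ∃ c cs, pvRep n = c :: cs ∧ c.isDigit = true := by
  have h := pvRep_isDigit n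
  cases hr : pvRep n with
  | nil =>
    exfalso
    rw [pvRep] at hr
    split at hr <;> simp at hr
  | cons c cs => exact ⟨c, cs, rfl, h c (by rw [hr]; exact List.mem_cons_self ..)⟩

lemma pvRep_foldl (n : Nat) : ∀ a : Nat,
    (pvRep n).foldl (fun a c => a * 10 + (c.toNat - 48)) a = a * 10 ^ (pvRep n).length + n := by
  fun_induction pvRep n with
  | case1 n h =>
    intro a
    simp [List.foldl, pvDigitChar_val _ (Nat.mod_lt _ (by omega))]
    omega
  | case2 n h ih =>
    intro a
    rw [List.foldl_append, ih]
    simp only [List.foldl_cons, List.foldl_nil, List.length_append, List.length_cons,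
      List.length_nil, pvDigitChar_val _ (Nat.mod_lt _ (by omega)), pow_succ]
    have h1 : a * (10 ^ (pvRep (n / 10)).length * 10) = a * 10 ^ (pvRep (n / 10)).length * 10 := by
      ring
    rw [h1]
    generalize a * 10 ^ (pvRep (n / 10)).length = X
    omega

-- span helper: an all-p block followed by a non-p element is consumed exactly by a p-scan
lemma pvTakeWhile_all_stop {p : Char → Bool} (l : List Char) (x : Char) (xs : List Char)
    (hl : ∀ c ∈ l, p c = true) (hx : p x = false) :
    (l ++ x :: xs).takeWhile p = l ∧ (l ++ x :: xs).dropWhile p = x :: xs := by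
  induction l with
  | nil => simp [List.takeWhile_cons, List.dropWhile_cons, hx]
  | cons c l ih =>
    have hc : p c = true := hl c (List.mem_cons_self ..)
    have := ih (fun d hd => hl d (List.mem_cons_of_mem _ hd))
    simp [List.takeWhile_cons, hc, this]

def pvSpecChars (d : Bool) (w : Int) : List Char :=
  '%' :: ((if d then ['-'] else []) ++ PySem.Int.toChars w ++ 's' :: ' ' :: ' ' :: [])

def pvColChars (d : Bool) (w : Int) (s : String) : List Char :=
  pvPad (d || decide (w < 0)) w.natAbs s.toList ++ [' ', ' ']

lemma pvApplyFmt_cons_spec (d : Bool) (w : Int) (s : String) (rest : List Char) (args : List String) :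
    pvApplyFmt (pvSpecChars d w ++ rest) (s :: args)
      = pvPad (d || decide (w < 0)) w.natAbs s.toList ++ ' ' :: ' ' :: pvApplyFmt rest args := by
  obtain ⟨c, cs, hrep, hdig⟩ := pvRep_cons w.natAbs
  have hcn : (c == '-') = false := by
    cases hbe : c == '-'
    · rfl
    · exfalso; rw [beq_iff_eq] at hbe; subst hbe; simp at hdig
  have htc : PySem.Int.toChars w = (if decide (w < 0) then ['-'] else []) ++ pvRep w.natAbs := by
    rw [PySem.Int.toChars]
    by_cases hw : w < 0
    · simp [hw, pvToDigits_eq]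
    · have : w.toNat = w.natAbs := by omega
      simp [hw, pvToDigits_eq, this]
  have hall : ∀ e ∈ pvRep w.natAbs, e.isDigit = true := pvRep_isDigit _
  have hs : ('s' : Char).isDigit = false := by decide
  have T1 : ∀ X : List Char, (pvRep w.natAbs ++ 's' :: X).takeWhile (fun c => c.isDigit) = pvRep w.natAbs :=
    fun X => (pvTakeWhile_all_stop _ _ _ hall hs).1
  have T2 : ∀ X : List Char, (pvRep w.natAbs ++ 's' :: X).dropWhile (fun c => c.isDigit) = 's' :: X :=
    fun X => (pvTakeWhile_all_stop _ _ _ hall hs).2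
  have T3 : ∀ X : List Char, (pvRep w.natAbs ++ 's' :: X).takeWhile (fun c => c == '-') = [] := by
    intro X; rw [hrep]; simp [List.takeWhile_cons, hcn]
  have T4 : ∀ X : List Char, (pvRep w.natAbs ++ 's' :: X).dropWhile (fun c => c == '-') = pvRep w.natAbs ++ 's' :: X := by
    intro X; rw [hrep]; simp [List.dropWhile_cons, hcn]
  have TF : (pvRep w.natAbs).foldl (fun a c => a * 10 + (c.toNat - 48)) 0 = w.natAbs := by
    have := pvRep_foldl w.natAbs 0; simpa using this
  have TSP : pvApplyFmt (' ' :: ' ' :: rest) args = ' ' :: ' ' :: pvApplyFmt rest args := by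
    simp [pvApplyFmt]
  rcases d <;> by_cases hw : w < 0 <;>
    simp only [pvSpecChars, htc, hw, decide_true, decide_false, Bool.false_or, Bool.true_or,
      if_true, if_false, List.nil_append, List.cons_append, List.append_assoc] <;>
    simp only [pvApplyFmt, List.takeWhile_cons, List.dropWhile_cons, T1, T2, T3, T4, TF, TSP] <;>
    simp [pvPad, TSP, T1, T2, T3, T4, TF]

lemma pvApplyFmt_flatMap (cols : List (Bool × Int × String)) :
    pvApplyFmt (cols.flatMap (fun c => pvSpecChars c.1 c.2.1)) (cols.map (fun c => c.2.2))
      = cols.flatMap (fun c => pvColChars c.1 c.2.1 c.2.2) := by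
  induction cols with
  | nil => simp [pvApplyFmt]
  | cons c cols ih =>
    simp only [List.flatMap_cons, List.map_cons]
    rw [pvApplyFmt_cons_spec, ih]
    simp [pvColChars]

def pvCols (items_len : List Int) (items : List String) : List (Bool × Int × String) :=
  (List.range items.length).map (fun k => (decide (k ≠ 2), items_len.getD k 0, items.getD k ""))

lemma pvMap_getD_range (items : List String) :
    (List.range items.length).map (fun k => items.getD k "") = items := by
  apply List.ext_getElem
  · simp
  · intro i h1 h2
    simp [List.getD_eq_getElem?_getD, List.getElem?_eq_getElem h2]

lemma pvA_fmt (items_len : List Int) (items : List String) :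
    get_print_items items_len items
      = String.ofList (pvApplyFmt ((pvCols items_len items).flatMap (fun c => pvSpecChars c.1 c.2.1)) items) := by
  unfold get_print_items
  rw [PySem.List.len_eq, PySem.List.pyRange_zero_nat, List.foldl_map]
  congr 1
  congr 1
  rw [PySem.List.foldl_congr_mem (List.range items.length) _
       (fun (acc : List Char) (k : Nat) => acc ++ pvSpecChars (decide (k ≠ 2)) (items_len.getD k 0)) []
       (by
         intro acc k _
         by_cases h : k = 2
         · subst h
           rw [show (2 : Int) = ((2 : Nat) : Int) from by norm_num,
             PySem.List.pyGet?_natCast]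
           simp [pvSpecChars, List.getD_eq_getElem?_getD]
         · have h2 : (k : Int) ≠ 2 := by omega
           simp [h, h2, pvSpecChars, List.getD_eq_getElem?_getD])]
  rw [PySem.List.foldl_append_eq_flatMap]
  simp [pvCols, List.flatMap_map]

lemma pvB_flat (items_len : List Int) (items : List String) :
    get_print_items_alt items_len items
      = String.ofList ((pvCols items_len items).flatMap (fun c => pvColChars c.1 c.2.1 c.2.2)) := by
  unfold get_print_items_alt
  congr 1
  rw [PySem.List.foldl_congr_mem (List.range items.length) _
       (fun (acc : List Char) (k : Nat) => acc ++ pvColChars (decide (k ≠ 2)) (items_len.getD k 0) (items.getD k "")) []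
       (by
         intro acc k _
         simp [pvColChars, List.getD_eq_getElem?_getD])]
  rw [PySem.List.foldl_append_eq_flatMap]
  simp [pvCols, List.flatMap_map]

-- ===== VERDICT (by name: the statement is the Claim_ definition above) =====
theorem get_print_items_spec : Claim_equal_get_print_items := by
  intro items_len items _ _
  unfold Spec_get_print_items
  rw [pvA_fmt, pvB_flat]
  have hm := pvApplyFmt_flatMap (pvCols items_len items)
  have hmap : (pvCols items_len items).map (fun c => c.2.2) = items := by
    simp [pvCols, List.map_map]
    exact pvMap_getD_range items
  rw [hmap] at hm
  rw [hm]
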